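-- pv_equiv track=rewrite | github.com/ryanzhao2/CourtVision | backend/pass_and_interception_detector/pass_and_interception_detector.py | detect_interceptions
-- ===== SOURCE A (Python) =====
-- def detect_interceptions(ball_acquisition,player_assignment, shot_attempts):
--     """
--     Detects interceptions, ignoring possession changes that occur after a shot attempt (i.e., rebounds).
--
--     Args:
--         ball_acquisition (list): A list indicating which player has possession of the ball in each frame.
--         player_assignment (list): A list of dictionaries indicating team assignments for each player.
--         shot_attempts (list): A list of booleans indicating if a shot was attempted in each frame.
--
--     Returns:
--         list: A list where each element indicates if an interception occurred in that frame.
--     """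
--     interceptions = [-1] * len(ball_acquisition)
--     prev_holder=-1
--     previous_frame=-1
--
--     for frame in range(1, len(ball_acquisition)):
--         if ball_acquisition[frame - 1] != -1:
--             prev_holder = ball_acquisition[frame - 1]
--             previous_frame= frame - 1
--
--         # Check if a shot was attempted in the last few frames to rule out rebounds
--         shot_window = 24 # Corresponds to ~1 second in a 24 FPS video
--         shot_occurred_recently = any(shot_attempts[max(0, frame - shot_window):frame])
--
--         current_holder = ball_acquisition[frame]
--
--         if prev_holder != -1 and current_holder != -1 and prev_holder != current_holder:
--             prev_team = player_assignment[previous_frame].get(prev_holder, -1)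
--             current_team = player_assignment[frame].get(current_holder, -1)
--
--             if prev_team != current_team and prev_team != -1 and current_team != -1 and not shot_occurred_recently:
--                 interceptions[frame] = current_team
--
--     return interceptions
-- ===== SOURCE B (Python) =====
-- def detect_interceptions(ball_acquisition, player_assignment, shot_attempts):
--     n = len(ball_acquisition)
--     m = len(shot_attempts)
--     # prefix counts of shot attempts: pref[k] = number of truthy entries in shot_attempts[:k]
--     pref = [0]
--     for s in shot_attempts:
--         pref.append(pref[-1] + (1 if s else 0))
--     # prev[i] = index of the last frame before i with a ball holder, or -1
--     prev = [-1]
--     for i in range(1, n):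
--         prev.append(i - 1 if ball_acquisition[i - 1] != -1 else prev[-1])
--
--     def label(i):
--         j = prev[i]
--         cur = ball_acquisition[i]
--         if j == -1 or cur == -1 or ball_acquisition[j] == cur:
--             return -1
--         if pref[min(i, m)] - pref[min(max(0, i - 24), m)] > 0:
--             return -1
--         prev_team = player_assignment[j].get(ball_acquisition[j], -1)
--         current_team = player_assignment[i].get(cur, -1)
--         if prev_team != current_team and prev_team != -1 and current_team != -1:
--             return current_team
--         return -1
--
--     return [label(i) for i in range(n)]
-- ===== Notes on version B (the rewrite author's own statement) =====
-- stated objective: alternative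
-- what changed: Replaces A's stateful frame loop (mutable prev_holder/previous_frame and an any() rescan of a 24-frame window per frame) with precomputed tables - a prefix-count array of shot attempts and a last-holder-index array - and builds the result directly as a per-frame map with no mutation.
import Mathlib
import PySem

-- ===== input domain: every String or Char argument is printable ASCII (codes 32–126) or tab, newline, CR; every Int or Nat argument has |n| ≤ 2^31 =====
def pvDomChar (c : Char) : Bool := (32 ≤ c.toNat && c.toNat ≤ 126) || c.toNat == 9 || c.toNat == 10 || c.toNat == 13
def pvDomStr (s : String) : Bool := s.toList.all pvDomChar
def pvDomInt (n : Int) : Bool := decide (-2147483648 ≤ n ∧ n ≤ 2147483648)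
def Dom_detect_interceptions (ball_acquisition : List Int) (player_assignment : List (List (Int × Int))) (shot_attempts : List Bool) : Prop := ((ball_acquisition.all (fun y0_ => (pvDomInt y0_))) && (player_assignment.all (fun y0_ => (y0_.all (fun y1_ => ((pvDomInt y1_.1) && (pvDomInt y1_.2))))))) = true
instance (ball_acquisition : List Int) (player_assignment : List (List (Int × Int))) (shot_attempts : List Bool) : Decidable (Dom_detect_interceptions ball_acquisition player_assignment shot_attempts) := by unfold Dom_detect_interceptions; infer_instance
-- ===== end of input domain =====

-- B replaces A's stateful frame loop (any() rescan of a 24-frame window each frame) by a prefix-count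
-- table of shot attempts plus a precomputed last-holder-index table, building the result as a direct
-- per-frame map (objective: alternative; equivalence of return values is proved on Pre_).

-- d.get(k, -1) on an insertion-ordered dict rendered as an association list (first match)
def pvDget (d : List (Int × Int)) (k : Int) : Int :=
  match d.find? (fun p => p.1 == k) with
  | some p => p.2
  | none => -1

-- ===== PORT A =====
def detect_interceptions (ball_acquisition : List Int) (player_assignment : List (List (Int × Int))) (shot_attempts : List Bool) : List Int :=
  let n : Int := ball_acquisition.length
  let st := (PySem.List.pyRange 1 n 1).foldl (fun (st : List Int × Int × Int) frame =>
    let ints := st.1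
    let prev_holder := st.2.1
    let previous_frame := st.2.2
    -- if ball_acquisition[frame-1] != -1: prev_holder, previous_frame updated
    -- (frame-1 is always in range here, so pyGetD's default is never used)
    let ph2 := if PySem.List.pyGetD ball_acquisition (frame - 1) 0 ≠ -1 then PySem.List.pyGetD ball_acquisition (frame - 1) 0 else prev_holder
    let pf2 := if PySem.List.pyGetD ball_acquisition (frame - 1) 0 ≠ -1 then frame - 1 else previous_frame
    let shot_occurred_recently := (PySem.List.slice shot_attempts (some (max 0 (frame - 24))) (some frame)).any id
    let current_holder := PySem.List.pyGetD ball_acquisition frame 0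
    if ph2 ≠ -1 ∧ current_holder ≠ -1 ∧ ph2 ≠ current_holder then
      -- player_assignment[previous_frame] / [frame]: out-of-range raises in Python (excluded by Pre_)
      let prev_team := pvDget (PySem.List.pyGetD player_assignment pf2 []) ph2
      let current_team := pvDget (PySem.List.pyGetD player_assignment frame []) current_holder
      if prev_team ≠ current_team ∧ prev_team ≠ -1 ∧ current_team ≠ -1 ∧ ¬ shot_occurred_recently = true then
        (PySem.List.pySetD ints frame current_team, ph2, pf2)
      else (ints, ph2, pf2)
    else (ints, ph2, pf2))
    (List.replicate ball_acquisition.length (-1 : Int), (-1 : Int), (-1 : Int))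
  st.1

-- ===== PORT B =====
-- pref[k] = number of truthy entries of shot_attempts[:k]
def pvPref (shot_attempts : List Bool) : List Int :=
  shot_attempts.foldl (fun pr s => pr ++ [PySem.List.pyGetD pr (-1) 0 + (if s then 1 else 0)]) [(0 : Int)]

-- prev[i] = index of the last frame before i with a ball holder, or -1
def pvPrev (ball_acquisition : List Int) : List Int :=
  (PySem.List.pyRange 1 (ball_acquisition.length : Int) 1).foldl
    (fun pv i => pv ++ [if PySem.List.pyGetD ball_acquisition (i - 1) 0 ≠ -1 then i - 1 else PySem.List.pyGetD pv (-1) 0])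
    [(-1 : Int)]

-- the nested helper 'label' of Source B
def pvLabel (ball_acquisition : List Int) (player_assignment : List (List (Int × Int))) (shot_attempts : List Bool) (i : Int) : Int :=
  let m : Int := shot_attempts.length
  let j := PySem.List.pyGetD (pvPrev ball_acquisition) i 0
  let cur := PySem.List.pyGetD ball_acquisition i 0
  if j = -1 ∨ cur = -1 ∨ PySem.List.pyGetD ball_acquisition j 0 = cur then -1
  else if PySem.List.pyGetD (pvPref shot_attempts) (min i m) 0 - PySem.List.pyGetD (pvPref shot_attempts) (min (max 0 (i - 24)) m) 0 > 0 then -1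
  else
    let prev_team := pvDget (PySem.List.pyGetD player_assignment j []) (PySem.List.pyGetD ball_acquisition j 0)
    let current_team := pvDget (PySem.List.pyGetD player_assignment i []) cur
    if prev_team ≠ current_team ∧ prev_team ≠ -1 ∧ current_team ≠ -1 then current_team else -1

def detect_interceptions_alt (ball_acquisition : List Int) (player_assignment : List (List (Int × Int))) (shot_attempts : List Bool) : List Int :=
  (PySem.List.pyRange 0 (ball_acquisition.length : Int) 1).map (pvLabel ball_acquisition player_assignment shot_attempts)

-- ===== PRECONDITION & SPEC =====
-- Pre_ excludes exactly the inputs where Python A raises IndexError: a possession change firing at a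
-- frame i with i ≥ len(player_assignment) (then player_assignment[i] is indexed out of range).
def Pre_detect_interceptions (ball_acquisition : List Int) (player_assignment : List (List (Int × Int))) (shot_attempts : List Bool) : Prop :=
  ∀ i : Nat, i < ball_acquisition.length →
    ball_acquisition.getD i 0 ≠ -1 →
    ((ball_acquisition.take i).filter (fun v => v != -1)).getLastD (ball_acquisition.getD i 0) ≠ ball_acquisition.getD i 0 →
    i < player_assignment.length
instance (ball_acquisition : List Int) (player_assignment : List (List (Int × Int))) (shot_attempts : List Bool) : Decidable (Pre_detect_interceptions ball_acquisition player_assignment shot_attempts) := by unfold Pre_detect_interceptions; infer_instance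

def pvWitness_detect_interceptions : List Int × (List (List (Int × Int))) × List Bool :=
  ([0, 1], [[(0, 0)], [(1, 1)]], [false, false])

def Spec_detect_interceptions (ball_acquisition : List Int) (player_assignment : List (List (Int × Int))) (shot_attempts : List Bool) (out : List Int) : Prop := out = detect_interceptions_alt ball_acquisition player_assignment shot_attempts
instance (ball_acquisition : List Int) (player_assignment : List (List (Int × Int))) (shot_attempts : List Bool) (out : List Int) : Decidable (Spec_detect_interceptions ball_acquisition player_assignment shot_attempts out) := by unfold Spec_detect_interceptions; infer_instance

-- ===== CLAIM (what is proved, stated in full; the proofs are below) =====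
def Claim_equal_detect_interceptions : Prop := ∀ (ball_acquisition : List Int) (player_assignment : List (List (Int × Int))) (shot_attempts : List Bool), Dom_detect_interceptions ball_acquisition player_assignment shot_attempts → Pre_detect_interceptions ball_acquisition player_assignment shot_attempts → Spec_detect_interceptions ball_acquisition player_assignment shot_attempts (detect_interceptions ball_acquisition player_assignment shot_attempts)

-- ===== LEMMAS AND PROOFS =====

-- index of the last j < k with ball[j] ≠ -1, or -1
def lastIdx (ball : List Int) : Nat → Int
  | 0 => -1
  | k + 1 => if ball.getD k 0 ≠ -1 then (k : Int) else lastIdx ball k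

-- the holder at that index, or -1
def phv (ball : List Int) (k : Nat) : Int :=
  if lastIdx ball k = -1 then -1 else ball.getD (lastIdx ball k).toNat 0

lemma lastIdx_spec (ball : List Int) (k : Nat) :
    lastIdx ball k = -1 ∨
      (0 ≤ lastIdx ball k ∧ lastIdx ball k < (k : Int) ∧ ball.getD (lastIdx ball k).toNat 0 ≠ -1) := by
  induction k with
  | zero => left; rfl
  | succ k ih =>
    unfold lastIdx
    split_ifs with h
    · right
      refine ⟨by exact_mod_cast Nat.zero_le k, by push_cast; omega, ?_⟩
      simpa using h
    · rcases ih with h1 | h1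
      · left; exact h1
      · right; exact ⟨h1.1, lt_trans h1.2.1 (by push_cast; omega), h1.2.2⟩

-- the value A writes (or leaves) at frame K, expressed through lastIdx/phv
def aStepVal (ball : List Int) (pa : List (List (Int × Int))) (shots : List Bool) (K : Nat) : Int :=
  if phv ball K ≠ -1 ∧ ball.getD K 0 ≠ -1 ∧ phv ball K ≠ ball.getD K 0 then
    let pt := pvDget (PySem.List.pyGetD pa (lastIdx ball K) []) (phv ball K)
    let ct := pvDget (PySem.List.pyGetD pa (K : Int) []) (ball.getD K 0)
    if pt ≠ ct ∧ pt ≠ -1 ∧ ct ≠ -1 ∧ ¬ ((PySem.List.slice shots (some (max 0 ((K : Int) - 24))) (some (K : Int))).any id) = true then ct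
    else -1
  else -1

lemma prevAux (ball : List Int) (d : Nat) :
    (PySem.List.pyRange 1 ((d + 1 : Nat) : Int) 1).foldl
      (fun pv i => pv ++ [if PySem.List.pyGetD ball (i - 1) 0 ≠ -1 then i - 1 else PySem.List.pyGetD pv (-1) 0])
      [(-1 : Int)] = (List.range (d + 1)).map (lastIdx ball) := by
  induction d with
  | zero =>
    rw [show ((1 : Nat) : Int) = 1 by norm_num, PySem.List.pyRange_one_eq_nil (le_refl 1)]
    simp [lastIdx]
  | succ d ih =>
    have hcast : ((d + 2 : Nat) : Int) = ((d + 1 : Nat) : Int) + 1 := by push_cast; ring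
    rw [hcast, PySem.List.pyRange_one_succ_right (by exact_mod_cast Nat.le_add_left 1 d),
      List.foldl_append, ih, List.foldl_cons, List.foldl_nil]
    have hlast : PySem.List.pyGetD ((List.range (d + 1)).map (lastIdx ball)) (-1) 0 = lastIdx ball d := by
      rw [List.range_succ, List.map_append, List.map_cons, List.map_nil,
        PySem.List.pyGetD_neg_one_append_singleton]
    have hball : PySem.List.pyGetD ball (((d + 1 : Nat) : Int) - 1) 0 = ball.getD d 0 := by
      rw [show (((d + 1 : Nat) : Int) - 1) = (d : Int) by push_cast; ring, PySem.List.pyGetD_natCast]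
    rw [hlast, hball, List.range_succ (n := d + 1), List.map_append, List.map_cons, List.map_nil]
    congr 1
    show _ = [lastIdx ball (d + 1)]
    rw [show lastIdx ball (d + 1) = if ball.getD d 0 ≠ -1 then (d : Int) else lastIdx ball d from rfl]
    split_ifs with h
    · congr 1; push_cast; ring
    · rfl

lemma pvPrev_getD (ball : List Int) (k : Nat) (hk : k < ball.length) :
    PySem.List.pyGetD (pvPrev ball) (k : Int) 0 = lastIdx ball k := by
  have hn : ball.length = (ball.length - 1) + 1 := by omega
  unfold pvPrev
  rw [hn, prevAux, PySem.List.pyGetD_natCast]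
  have hk' : k < (ball.length - 1) + 1 := by omega
  simp [List.getD, hk']

lemma pvPref_eq (shots : List Bool) :
    pvPref shots = (List.range (shots.length + 1)).map (fun k => ((shots.take k).countP id : Int)) := by
  induction shots using List.reverseRecOn with
  | nil => simp [pvPref]
  | append_singleton ys s ih =>
    unfold pvPref at ih ⊢
    rw [List.foldl_append, ih, List.foldl_cons, List.foldl_nil]
    have hlast : PySem.List.pyGetD ((List.range (ys.length + 1)).map (fun k => ((ys.take k).countP id : Int))) (-1) 0
        = ((ys.countP id : Nat) : Int) := by
      rw [List.range_succ, List.map_append, List.map_cons, List.map_nil,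
        PySem.List.pyGetD_neg_one_append_singleton, List.take_of_length_le (le_refl _)]
    rw [hlast]
    rw [show (ys ++ [s]).length + 1 = (ys.length + 1) + 1 by simp, List.range_succ (n := ys.length + 1),
      List.map_append, List.map_cons, List.map_nil]
    congr 1
    · apply List.map_congr_left
      intro k hk
      rw [List.mem_range] at hk
      rw [List.take_append_of_le_length (by omega)]
    · rw [List.take_of_length_le (by simp)]
      simp [List.countP_append, List.countP_cons]

lemma countP_take_min (shots : List Bool) (k : Nat) :
    ((shots.take (min k shots.length)).countP id) = ((shots.take k).countP id) := by
  rcases le_total k shots.length with h | h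
  · rw [min_eq_left h]
  · rw [min_eq_right h, List.take_of_length_le h, List.take_of_length_le (le_refl _)]

lemma pref_getD (shots : List Bool) (k : Nat) (hk : k ≤ shots.length) :
    PySem.List.pyGetD (pvPref shots) (k : Int) 0 = ((shots.take k).countP id : Int) := by
  rw [pvPref_eq, PySem.List.pyGetD_natCast]
  simp [List.getD, Nat.lt_succ_of_le hk]

lemma shot_eq (shots : List Bool) (K : Nat) :
    ((PySem.List.slice shots (some (max 0 ((K : Int) - 24))) (some (K : Int))).any id = true) ↔
    (PySem.List.pyGetD (pvPref shots) (min (K : Int) (shots.length : Int)) 0 -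
      PySem.List.pyGetD (pvPref shots) (min (max 0 ((K : Int) - 24)) (shots.length : Int)) 0 > 0) := by
  have ha : max 0 ((K : Int) - 24) = ((K - 24 : Nat) : Int) := by omega
  have hminK : min (K : Int) (shots.length : Int) = ((min K shots.length : Nat) : Int) := by omega
  have hmina : min ((K - 24 : Nat) : Int) (shots.length : Int) = ((min (K - 24) shots.length : Nat) : Int) := by
    push_cast; omega
  rw [ha, hminK, hmina, PySem.List.slice_natCast,
    pref_getD _ _ (min_le_right _ _), pref_getD _ _ (min_le_right _ _),
    countP_take_min, countP_take_min]
  have htake : shots.take K = shots.take (K - 24) ++ (shots.drop (K - 24)).take (K - (K - 24)) := by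
    rw [← List.take_add]
    congr 1
    omega
  rw [htake, List.countP_append]
  constructor
  · intro h
    rw [List.any_eq_true] at h
    obtain ⟨x, hx, hid⟩ := h
    have : 0 < ((shots.drop (K - 24)).take (K - (K - 24))).countP id :=
      List.countP_pos_iff.mpr ⟨x, hx, hid⟩
    push_cast
    omega
  · intro h
    have : 0 < ((shots.drop (K - 24)).take (K - (K - 24))).countP id := by
      by_contra hc
      push_cast at h
      omega
    obtain ⟨x, hx, hid⟩ := List.countP_pos_iff.mp this
    rw [List.any_eq_true]
    exact ⟨x, hx, hid⟩

lemma pvLabel_eq (ball : List Int) (pa : List (List (Int × Int))) (shots : List Bool) (K : Nat)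
    (hK : K < ball.length) :
    pvLabel ball pa shots (K : Int) = aStepVal ball pa shots K := by
  unfold pvLabel aStepVal
  dsimp only
  rw [pvPrev_getD ball K hK, PySem.List.pyGetD_natCast]
  rcases lastIdx_spec ball K with hj | ⟨hj0, hjK, hjv⟩
  · rw [hj]
    have hph : phv ball K = -1 := by rw [phv, if_pos hj]
    simp [hph]
  · have hjne : lastIdx ball K ≠ -1 := by omega
    have hph : phv ball K = ball.getD (lastIdx ball K).toNat 0 := by rw [phv, if_neg hjne]
    have hget : PySem.List.pyGetD ball (lastIdx ball K) 0 = ball.getD (lastIdx ball K).toNat 0 :=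
      PySem.List.pyGetD_of_nonneg _ _ hj0
    rw [hget, hph]
    by_cases hcur : ball.getD K 0 = -1
    · rw [if_pos (Or.inr (Or.inl hcur)), if_neg (by tauto)]
    · by_cases hsame : ball.getD (lastIdx ball K).toNat 0 = ball.getD K 0
      · rw [if_pos (Or.inr (Or.inr hsame)), if_neg (by tauto)]
      · rw [if_neg (by tauto), if_pos (And.intro hjv (And.intro hcur hsame))]
        by_cases hshot : (PySem.List.slice shots (some (max 0 ((K : Int) - 24))) (some (K : Int))).any id = true
        · rw [if_pos ((shot_eq shots K).mp hshot), if_neg (by tauto)]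
        · rw [if_neg (fun hc => hshot ((shot_eq shots K).mpr hc))]
          by_cases hteams :
              pvDget (PySem.List.pyGetD pa (lastIdx ball K) []) (ball.getD (lastIdx ball K).toNat 0) ≠
                  pvDget (PySem.List.pyGetD pa (K : Int) []) (ball.getD K 0) ∧
                pvDget (PySem.List.pyGetD pa (lastIdx ball K) []) (ball.getD (lastIdx ball K).toNat 0) ≠ -1 ∧
                  pvDget (PySem.List.pyGetD pa (K : Int) []) (ball.getD K 0) ≠ -1
          · rw [if_pos hteams, if_pos ⟨hteams.1, hteams.2.1, hteams.2.2, hshot⟩]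
          · rw [if_neg hteams, if_neg (by tauto)]

lemma map_cutoff_set (n k : Nat) (f : Nat → Int) (_hk : k < n) (v : Int) (hv : f k = v) :
    ((List.range n).map (fun i => if i < k then f i else -1)).set k v
      = (List.range n).map (fun i => if i < k + 1 then f i else -1) := by
  apply List.ext_getElem
  · simp
  · intro i h1 h2
    simp only [List.length_set, List.length_map, List.length_range] at h1
    simp only [List.getElem_set, List.getElem_map, List.getElem_range]
    by_cases hik : k = i
    · subst hik
      simp [hv]
    · have hiff : (i < k) ↔ (i < k + 1) := by omega
      simp [hik, hiff]

lemma map_cutoff_succ (n k : Nat) (f : Nat → Int) (hv : f k = -1) :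
    (List.range n).map (fun i => if i < k then f i else -1)
      = (List.range n).map (fun i => if i < k + 1 then f i else -1) := by
  apply List.map_congr_left
  intro i _
  by_cases hik : i = k
  · subst hik
    simp [hv]
  · have hiff : (i < k) ↔ (i < k + 1) := by omega
    simp [hiff]

lemma aAux (ball : List Int) (pa : List (List (Int × Int))) (shots : List Bool) (K : Nat)
    (hK1 : 1 ≤ K) (hKn : K ≤ ball.length) :
    (PySem.List.pyRange 1 (K : Int) 1).foldl (fun (st : List Int × Int × Int) frame =>
      let ints := st.1
      let prev_holder := st.2.1
      let previous_frame := st.2.2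
      let ph2 := if PySem.List.pyGetD ball (frame - 1) 0 ≠ -1 then PySem.List.pyGetD ball (frame - 1) 0 else prev_holder
      let pf2 := if PySem.List.pyGetD ball (frame - 1) 0 ≠ -1 then frame - 1 else previous_frame
      let shot_occurred_recently := (PySem.List.slice shots (some (max 0 (frame - 24))) (some frame)).any id
      let current_holder := PySem.List.pyGetD ball frame 0
      if ph2 ≠ -1 ∧ current_holder ≠ -1 ∧ ph2 ≠ current_holder then
        let prev_team := pvDget (PySem.List.pyGetD pa pf2 []) ph2
        let current_team := pvDget (PySem.List.pyGetD pa frame []) current_holder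
        if prev_team ≠ current_team ∧ prev_team ≠ -1 ∧ current_team ≠ -1 ∧ ¬ shot_occurred_recently = true then
          (PySem.List.pySetD ints frame current_team, ph2, pf2)
        else (ints, ph2, pf2)
      else (ints, ph2, pf2))
      (List.replicate ball.length (-1 : Int), (-1 : Int), (-1 : Int))
    = ((List.range ball.length).map (fun i => if i < K then aStepVal ball pa shots i else -1),
       phv ball (K - 1), lastIdx ball (K - 1)) := by
  induction K with
  | zero => omega
  | succ k ih =>
    simp only [Nat.add_sub_cancel]
    rcases Nat.eq_zero_or_pos k with hk0 | hk1
    · subst hk0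
      rw [show ((0 + 1 : Nat) : Int) = 1 by norm_num, PySem.List.pyRange_one_eq_nil (le_refl 1),
        List.foldl_nil]
      simp only [Prod.mk.injEq]
      refine ⟨?_, by simp [phv, lastIdx], by simp [lastIdx]⟩
      apply List.ext_getElem
      · simp
      · intro i h1 h2
        simp only [List.getElem_replicate, List.getElem_map, List.getElem_range]
        by_cases hi : i < 1
        · have hi0 : i = 0 := by omega
          subst hi0
          simp [aStepVal, phv, lastIdx]
        · simp [hi]
    · have hcast : ((k + 1 : Nat) : Int) = ((k : Nat) : Int) + 1 := by push_cast; ring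
      rw [hcast, PySem.List.pyRange_one_succ_right (by exact_mod_cast hk1), List.foldl_append,
        ih hk1 (by omega), List.foldl_cons, List.foldl_nil]
      dsimp only
      have hb : PySem.List.pyGetD ball ((k : Int) - 1) 0 = ball.getD (k - 1) 0 := by
        rw [show ((k : Int) - 1) = ((k - 1 : Nat) : Int) by push_cast [hk1]; omega,
          PySem.List.pyGetD_natCast]
      have hkk : k = (k - 1) + 1 := by omega
      have hlast : lastIdx ball k = if ball.getD (k - 1) 0 ≠ -1 then ((k : Int) - 1) else lastIdx ball (k - 1) := by
        conv_lhs => rw [hkk]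
        rw [show lastIdx ball ((k - 1) + 1) = if ball.getD (k - 1) 0 ≠ -1 then ((k - 1 : Nat) : Int) else lastIdx ball (k - 1) from rfl]
        split_ifs with h
        · omega
        · rfl
      have hphv : phv ball k = if ball.getD (k - 1) 0 ≠ -1 then ball.getD (k - 1) 0 else phv ball (k - 1) := by
        by_cases h : ball.getD (k - 1) 0 ≠ -1
        · rw [if_pos h, phv, hlast, if_pos h, if_neg (by omega)]
          congr 1
          omega
        · rw [if_neg h, phv, phv, hlast, if_neg h]
      rw [hb, ← hphv, ← hlast, PySem.List.pyGetD_natCast]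
      by_cases C1 : phv ball k ≠ -1 ∧ ball.getD k 0 ≠ -1 ∧ phv ball k ≠ ball.getD k 0
      · rw [if_pos C1]
        by_cases C2 : pvDget (PySem.List.pyGetD pa (lastIdx ball k) []) (phv ball k) ≠
              pvDget (PySem.List.pyGetD pa (k : Int) []) (ball.getD k 0) ∧
            pvDget (PySem.List.pyGetD pa (lastIdx ball k) []) (phv ball k) ≠ -1 ∧
              pvDget (PySem.List.pyGetD pa (k : Int) []) (ball.getD k 0) ≠ -1 ∧
                ¬ ((PySem.List.slice shots (some (max 0 ((k : Int) - 24))) (some (k : Int))).any id) = true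
        · rw [if_pos C2]
          have hval : aStepVal ball pa shots k =
              pvDget (PySem.List.pyGetD pa (k : Int) []) (ball.getD k 0) := by
            unfold aStepVal
            rw [if_pos C1, if_pos C2]
          simp only [Prod.mk.injEq]
          refine ⟨?_, trivial⟩
          rw [PySem.List.pySetD_natCast]
          exact map_cutoff_set ball.length k (aStepVal ball pa shots) (by omega) _ hval
        · rw [if_neg C2]
          have hval : aStepVal ball pa shots k = -1 := by
            unfold aStepVal
            rw [if_pos C1, if_neg C2]
          simp only [Prod.mk.injEq]
          exact ⟨map_cutoff_succ ball.length k (aStepVal ball pa shots) hval, trivial⟩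
      · rw [if_neg C1]
        have hval : aStepVal ball pa shots k = -1 := by
          unfold aStepVal
          rw [if_neg C1]
        simp only [Prod.mk.injEq]
        exact ⟨map_cutoff_succ ball.length k (aStepVal ball pa shots) hval, trivial⟩

theorem detect_interceptions_spec : Claim_equal_detect_interceptions := by
  intro ball pa shots _ _
  unfold Spec_detect_interceptions detect_interceptions detect_interceptions_alt
  dsimp only
  rcases Nat.eq_zero_or_pos ball.length with h0 | h1
  · have hb : ball = [] := List.length_eq_zero_iff.mp h0
    subst hb
    have e1 : PySem.List.pyRange 1 ((List.length ([] : List Int)) : Int) 1 = [] :=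
      PySem.List.pyRange_one_eq_nil (by simp)
    have e2 : PySem.List.pyRange 0 ((List.length ([] : List Int)) : Int) 1 = [] :=
      PySem.List.pyRange_one_eq_nil (by simp)
    rw [e1, e2]
    simp
  · rw [aAux ball pa shots ball.length h1 (le_refl _)]
    rw [PySem.List.pyRange_zero_nat, List.map_map]
    apply List.map_congr_left
    intro i hi
    rw [List.mem_range] at hi
    rw [if_pos hi]
    exact (pvLabel_eq ball pa shots i hi).symm
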